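-- pv_equiv track=rewrite | github.com/cyber3pxVA/Medicode | medical-coding-app/app/drg/severity.py | score_root
-- ===== SOURCE A (Python) =====
-- from typing import List, Dict, Optional, Tuple
--
-- def score_root(root: str, data: Dict[str, List[Dict]]) -> Tuple[int, int, int]:
--     """Return a tuple for sorting: (severity_span_score, mcc_count, total_variants)"""
--     variants = data.get('drgs', [])
--     severities = [v.get('severity') for v in variants]
--     sev_set = set(severities)
--     span = 0
--     if 'MCC' in sev_set:
--         span += 2
--     if 'CC' in sev_set:
--         span += 1
--     mcc_count = sum(1 for s in severities if s == 'MCC')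
--     return (span, mcc_count, len(variants))
-- ===== SOURCE B (Python) =====
-- def score_root(root, data):
--     """Return a tuple for sorting: (severity_span_score, mcc_count, total_variants)"""
--     has_mcc = False
--     has_cc = False
--     mcc_count = 0
--     total = 0
--     for v in data.get('drgs', []):
--         s = v.get('severity')
--         if s == 'MCC':
--             has_mcc = True
--             mcc_count += 1
--         elif s == 'CC':
--             has_cc = True
--         total += 1
--     return (2 * has_mcc + has_cc, mcc_count, total)
-- ===== Notes on version B (the rewrite author's own statement) =====
-- stated objective: alternative
-- what changed: Replaced the three separate traversals (severity list comprehension + set construction and membership tests + generator count) with one explicit loop maintaining has_mcc/has_cc flags, an MCC counter and a total, computing the span arithmetically afterwards.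
import Mathlib
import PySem

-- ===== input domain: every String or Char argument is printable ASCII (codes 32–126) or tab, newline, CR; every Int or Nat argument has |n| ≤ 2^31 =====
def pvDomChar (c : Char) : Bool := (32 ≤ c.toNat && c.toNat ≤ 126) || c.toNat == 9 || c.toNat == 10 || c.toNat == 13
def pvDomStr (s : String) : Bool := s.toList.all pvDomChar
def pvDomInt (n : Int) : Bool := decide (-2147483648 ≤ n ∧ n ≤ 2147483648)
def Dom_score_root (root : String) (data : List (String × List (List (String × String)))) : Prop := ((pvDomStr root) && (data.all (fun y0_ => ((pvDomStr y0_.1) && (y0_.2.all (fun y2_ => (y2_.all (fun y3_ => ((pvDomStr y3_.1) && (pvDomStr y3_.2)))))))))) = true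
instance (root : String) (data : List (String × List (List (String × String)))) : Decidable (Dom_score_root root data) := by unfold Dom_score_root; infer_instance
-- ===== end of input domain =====

-- B replaces A's three traversals with one explicit loop maintaining flags and counters (alternative decomposition, same cost); equivalence proved on all inputs.
-- ===== PORT A =====
def score_root (root : String) (data : List (String × List (List (String × String)))) : Int × Int × Int :=
  let variants := (PySem.Dict.mk data).getD "drgs" []
  let severities := variants.map (fun v => (PySem.Dict.mk v).get? "severity")
  let sevSet := PySem.Set.ofList severities
  let span0 : Int := 0
  let span1 : Int := if PySem.Set.contains sevSet (some "MCC") then span0 + 2 else span0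
  let span2 : Int := if PySem.Set.contains sevSet (some "CC") then span1 + 1 else span1
  let mcc_count : Int := severities.foldl (fun acc s => if s == some "MCC" then acc + 1 else acc) 0
  (span2, mcc_count, (variants.length : Int))

-- ===== PORT B =====
def pvStepB (st : Bool × Bool × Int × Int) (v : List (String × String)) : Bool × Bool × Int × Int :=
  let s := (PySem.Dict.mk v).get? "severity"
  let st1 := if s == some "MCC" then (true, st.2.1, st.2.2.1 + 1, st.2.2.2)
             else if s == some "CC" then (st.1, true, st.2.2.1, st.2.2.2)
             else st
  (st1.1, st1.2.1, st1.2.2.1, st1.2.2.2 + 1)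

def score_root_alt (root : String) (data : List (String × List (List (String × String)))) : Int × Int × Int :=
  let st := ((PySem.Dict.mk data).getD "drgs" []).foldl pvStepB (false, false, 0, 0)
  (2 * (if st.1 then (1 : Int) else 0) + (if st.2.1 then (1 : Int) else 0), st.2.2.1, st.2.2.2)

-- ===== PRECONDITION & SPEC =====
def Spec_score_root (root : String) (data : List (String × List (List (String × String)))) (out : Int × Int × Int) : Prop := out = score_root_alt root data
instance (root : String) (data : List (String × List (List (String × String)))) (out : Int × Int × Int) : Decidable (Spec_score_root root data out) := by unfold Spec_score_root; infer_instance

-- ===== CLAIM (what is proved, stated in full; the proofs are below) =====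
def Claim_equal_score_root : Prop := ∀ (root : String) (data : List (String × List (List (String × String)))), Dom_score_root root data → Spec_score_root root data (score_root root data)

-- ===== LEMMAS AND PROOFS =====
theorem pvFoldB_spec (vs : List (List (String × String))) (hm hc : Bool) (m t : Int) :
    vs.foldl pvStepB (hm, hc, m, t) =
      (hm || vs.any (fun v => (PySem.Dict.mk v).get? "severity" == some "MCC"),
       hc || vs.any (fun v => (PySem.Dict.mk v).get? "severity" == some "CC"),
       m + ((vs.countP (fun v => (PySem.Dict.mk v).get? "severity" == some "MCC") : Nat) : Int),
       t + (vs.length : Int)) := by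
  induction vs generalizing hm hc m t with
  | nil => simp
  | cons v vs ih =>
    simp only [List.foldl_cons, List.any_cons, List.countP_cons, List.length_cons]
    by_cases h1 : ((PySem.Dict.mk v).get? "severity" == some "MCC") = true
    · have h2 : ((PySem.Dict.mk v).get? "severity" == some "CC") = false := by
        rw [beq_iff_eq] at h1; simp [h1]
      simp [pvStepB, h1, h2, ih, add_comm, add_left_comm, add_assoc]
    · by_cases h2 : ((PySem.Dict.mk v).get? "severity" == some "CC") = true
      · simp [pvStepB, h1, h2, ih, add_comm, add_left_comm, add_assoc]
      · simp [pvStepB, h1, h2, ih, add_comm, add_left_comm, add_assoc]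

theorem pvCountFold (ss : List (Option String)) (a : Int) :
    ss.foldl (fun acc s => if s == some "MCC" then acc + 1 else acc) a =
      a + ((ss.countP (fun s => s == some "MCC") : Nat) : Int) := by
  induction ss generalizing a with
  | nil => simp
  | cons s ss ih =>
    rw [List.foldl_cons, List.countP_cons]
    by_cases h : (s == some "MCC") = true
    · rw [if_pos h, ih, if_pos h]
      push_cast; ring
    · rw [if_neg (by simp [h]), ih, if_neg h]
      simp

-- ===== VERDICT (by name: the statement is the Claim_ definition above) =====
theorem score_root_spec : Claim_equal_score_root := by
  intro root data _
  unfold Spec_score_root score_root score_root_alt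
  rw [pvFoldB_spec]
  have hcontains : ∀ (L : List (List (String × String))) (x : Option String),
      (PySem.Set.ofList (L.map (fun v => (PySem.Dict.mk v).get? "severity"))).contains x =
        L.any (fun v => (PySem.Dict.mk v).get? "severity" == x) := by
    intro L x
    rw [Bool.eq_iff_iff, PySem.Set.contains_iff, PySem.Set.mem_ofList, List.mem_map,
      List.any_eq_true]
    constructor
    · rintro ⟨v, hv, he⟩; exact ⟨v, hv, by simp [he]⟩
    · rintro ⟨v, hv, he⟩; exact ⟨v, hv, by simpa using he⟩
  simp only [hcontains, pvCountFold, List.countP_map]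
  by_cases hM : (((PySem.Dict.mk data).getD "drgs" []).any
      (fun v => (PySem.Dict.mk v).get? "severity" == some "MCC")) = true <;>
    by_cases hC : (((PySem.Dict.mk data).getD "drgs" []).any
      (fun v => (PySem.Dict.mk v).get? "severity" == some "CC")) = true <;>
    simp [hM, hC, Function.comp_def]
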